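-- pv_equiv track=rewrite | github.com/itsankk05/LyricX | run.py | _tokenize_words_flat
-- ===== SOURCE A (Python) =====
-- from typing import List, Tuple
--
-- def _tokenize_words_flat(text: str) -> Tuple[dict, int]:
--     """
--     Build a mapping from absolute char index to word_id for a single string.
--     Returns (char_to_word, next_word_id).
--     """
--     char_to_word = {}
--     word_id = -1
--     i = 0
--     next_word_id = 0
--     while i < len(text):
--         if text[i].isspace():
--             i += 1
--             continue
--         j = i
--         while j < len(text) and not text[j].isspace():
--             j += 1
--         word_id = next_word_id
--         for k in range(i, j):
--             char_to_word[k] = word_id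
--         next_word_id += 1
--         i = j
--     return char_to_word, next_word_id
-- ===== SOURCE B (Python) =====
-- from typing import List, Tuple
--
-- def _tokenize_words_flat(text: str) -> Tuple[dict, int]:
--     """
--     Build a mapping from absolute char index to word_id for a single string.
--     Returns (char_to_word, next_word_id).
--     One-pass state machine over enumerate(text) with an in_word flag.
--     """
--     char_to_word = {}
--     in_word = False
--     word_id = 0
--     next_word_id = 0
--     for i, ch in enumerate(text):
--         if ch.isspace():
--             in_word = False
--         else:
--             if not in_word:
--                 word_id = next_word_id
--                 next_word_id += 1
--                 in_word = True
--             char_to_word[i] = word_id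
--     return char_to_word, next_word_id
-- ===== Notes on version B (the rewrite author's own statement) =====
-- stated objective: idiomatic
-- what changed: Replaced A's nested outer/inner word-boundary scan (outer while plus inner while to find the word end, then a range loop to fill entries) with a single flat pass over enumerate(text) maintaining an in_word flag and a next_word_id counter.
import Mathlib
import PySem

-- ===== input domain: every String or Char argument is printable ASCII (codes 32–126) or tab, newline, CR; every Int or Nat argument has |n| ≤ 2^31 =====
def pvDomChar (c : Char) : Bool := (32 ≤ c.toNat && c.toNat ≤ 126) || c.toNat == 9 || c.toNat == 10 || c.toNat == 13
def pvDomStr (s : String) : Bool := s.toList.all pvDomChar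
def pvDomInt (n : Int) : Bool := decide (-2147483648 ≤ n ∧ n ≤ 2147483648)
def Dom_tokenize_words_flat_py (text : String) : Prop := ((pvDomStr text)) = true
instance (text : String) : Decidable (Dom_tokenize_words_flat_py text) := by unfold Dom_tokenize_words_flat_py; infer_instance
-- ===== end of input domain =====

-- B replaces A's nested word-boundary scan by a single flat pass over enumerate(text)
-- with an in_word flag (idiomatic one-pass state machine); same return value.

-- ===== PORT A =====
-- inner 'while j < len(text) and not text[j].isspace(): j += 1'
def pvAInner (cs : List Char) (j : Nat) : Nat :=
  if h : j < cs.length then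
    if PySem.Chars.isspace cs[j] then j
    else pvAInner cs (j + 1)
  else j
termination_by cs.length - j

-- termination helpers for the outer loop: the inner scan strictly advances on a non-space char
theorem pvAInner_ge (cs : List Char) (j : Nat) : j ≤ pvAInner cs j := by
  induction j using pvAInner.induct cs with
  | case1 j h hs => rw [pvAInner, dif_pos h, if_pos hs]
  | case2 j h hs ih => rw [pvAInner, dif_pos h, if_neg (by simp [hs])]; omega
  | case3 j h => rw [pvAInner, dif_neg h]

theorem pvAInner_gt (cs : List Char) (i : Nat) (h : i < cs.length)
    (hs : PySem.Chars.isspace cs[i] = false) : i < pvAInner cs i := by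
  rw [pvAInner, dif_pos h, if_neg (by simp [hs])]
  have := pvAInner_ge cs (i + 1); omega

-- outer 'while i < len(text)' loop of A
def pvAOuter (cs : List Char) (i : Nat) (acc : List (Int × Int)) (next : Int) :
    (List (Int × Int)) × Int :=
  if h : i < cs.length then
    if PySem.Chars.isspace cs[i] then pvAOuter cs (i + 1) acc next
    else
      let j := pvAInner cs i
      pvAOuter cs j (acc ++ (PySem.List.pyRange (i : Int) (j : Int) 1).map (fun k => (k, next)))
        (next + 1)
  else (acc, next)
termination_by cs.length - i
decreasing_by
  · omega
  · have := pvAInner_gt cs i h (by simpa using ‹¬ PySem.Chars.isspace cs[i] = true›); omega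

def tokenize_words_flat_py (text : String) : (List (Int × Int)) × Int :=
  pvAOuter text.toList 0 [] 0

-- ===== PORT B =====
-- one step of B's for-loop: state = (char_to_word, in_word, word_id, next_word_id)
def pvBStep (st : List (Int × Int) × Bool × Int × Int) (p : Int × Char) :
    List (Int × Int) × Bool × Int × Int :=
  if PySem.Chars.isspace p.2 then (st.1, false, st.2.2.1, st.2.2.2)
  else if st.2.1 = false then (st.1 ++ [(p.1, st.2.2.2)], true, st.2.2.2, st.2.2.2 + 1)
  else (st.1 ++ [(p.1, st.2.2.1)], true, st.2.2.1, st.2.2.2)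

def tokenize_words_flat_py_alt (text : String) : (List (Int × Int)) × Int :=
  let st := (PySem.List.enumerate text.toList 0).foldl pvBStep ([], false, 0, 0)
  (st.1, st.2.2.2)

-- ===== PRECONDITION & SPEC =====
def Spec_tokenize_words_flat_py (text : String) (out : (List (Int × Int)) × Int) : Prop := out = tokenize_words_flat_py_alt text
instance (text : String) (out : (List (Int × Int)) × Int) : Decidable (Spec_tokenize_words_flat_py text out) := by unfold Spec_tokenize_words_flat_py; infer_instance

-- ===== CLAIM (what is proved, stated in full; the proofs are below) =====
def Claim_equal_tokenize_words_flat_py : Prop := ∀ (text : String), Dom_tokenize_words_flat_py text → Spec_tokenize_words_flat_py text (tokenize_words_flat_py text)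

-- ===== LEMMAS AND PROOFS =====

theorem pvAInner_skip (cs : List Char) (j : Nat) (h : j < cs.length)
    (hs : PySem.Chars.isspace cs[j] = false) : pvAInner cs j = pvAInner cs (j + 1) := by
  rw [pvAInner, dif_pos h, if_neg (by simp [hs])]

theorem pvAInner_here_space (cs : List Char) (j : Nat) (h : j < cs.length)
    (hs : PySem.Chars.isspace cs[j] = true) : pvAInner cs j = j := by
  rw [pvAInner, dif_pos h, if_pos hs]

theorem pvAInner_here_end (cs : List Char) (j : Nat) (h : ¬ j < cs.length) :
    pvAInner cs j = j := by rw [pvAInner, dif_neg h]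

theorem pvAInner_le (cs : List Char) (j : Nat) (h : j ≤ cs.length) :
    pvAInner cs j ≤ cs.length := by
  induction j using pvAInner.induct cs with
  | case1 j h' hs => rw [pvAInner_here_space cs j h' hs]; omega
  | case2 j h' hs ih => rw [pvAInner_skip cs j h' (by simpa using hs)]; exact ih (by omega)
  | case3 j h' => rw [pvAInner_here_end cs j h']; omega

theorem pvAInner_stop (cs : List Char) (j : Nat)
    (h : pvAInner cs j < cs.length) : PySem.Chars.isspace (cs[pvAInner cs j]'h) = true := by
  induction j using pvAInner.induct cs with
  | case1 j h' hs => simp only [pvAInner_here_space cs j h' hs] at h ⊢; exact hs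
  | case2 j h' hs ih =>
      have e := pvAInner_skip cs j h' (by simpa using hs)
      simp only [e] at h ⊢; exact ih h
  | case3 j h' =>
      rw [pvAInner_here_end cs j h'] at h; omega

theorem pvAOuter_end (cs : List Char) (i : Nat) (acc : List (Int × Int)) (next : Int)
    (h : ¬ i < cs.length) : pvAOuter cs i acc next = (acc, next) := by
  rw [pvAOuter, dif_neg h]

theorem pvAOuter_space (cs : List Char) (i : Nat) (acc : List (Int × Int)) (next : Int)
    (h : i < cs.length) (hs : PySem.Chars.isspace cs[i] = true) :
    pvAOuter cs i acc next = pvAOuter cs (i + 1) acc next := by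
  rw [pvAOuter, dif_pos h, if_pos hs]

theorem pvAOuter_word (cs : List Char) (i : Nat) (acc : List (Int × Int)) (next : Int)
    (h : i < cs.length) (hs : PySem.Chars.isspace cs[i] = false) :
    pvAOuter cs i acc next
      = pvAOuter cs (pvAInner cs i)
          (acc ++ (PySem.List.pyRange (i : Int) ((pvAInner cs i : Nat) : Int) 1).map
            (fun k => (k, next))) (next + 1) := by
  rw [pvAOuter, dif_pos h, if_neg (by simp [hs])]

-- a run of non-space chars with in_word = true appends one (k, w) entry per char
theorem pvRun (cs : List Char) (i : Nat) (acc : List (Int × Int)) (w next : Int) :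
    (PySem.List.enumerate (cs.drop i) (i : Int)).foldl pvBStep (acc, true, w, next)
      = (PySem.List.enumerate (cs.drop (pvAInner cs i)) ((pvAInner cs i : Nat) : Int)).foldl
          pvBStep
          (acc ++ (PySem.List.pyRange (i : Int) ((pvAInner cs i : Nat) : Int) 1).map
            (fun k => (k, w)), true, w, next) := by
  induction i using pvAInner.induct cs generalizing acc with
  | case1 j h hs =>
      rw [pvAInner_here_space cs j h hs]
      have hr : PySem.List.pyRange (j : Int) (j : Int) 1 = [] := by simp [pysem]
      rw [hr]; simp
  | case2 j h hs ih =>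
      have hs' : PySem.Chars.isspace cs[j] = false := by simpa using hs
      conv_lhs => rw [List.drop_eq_getElem_cons h]
      rw [PySem.List.enumerate_cons, List.foldl_cons]
      have hstep : pvBStep (acc, true, w, next) ((j : Int), cs[j])
          = (acc ++ [((j : Int), w)], true, w, next) := by
        simp [pvBStep, hs']
      rw [hstep]
      have hcast : ((j : Int) + 1) = ((j + 1 : Nat) : Int) := by push_cast; ring
      rw [hcast, ih (acc ++ [((j : Int), w)]), pvAInner_skip cs j h hs']
      congr 2
      have hlt : (j : Int) < ((pvAInner cs (j + 1) : Nat) : Int) := by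
        have := pvAInner_ge cs (j + 1); exact_mod_cast (by omega : j < pvAInner cs (j + 1))
      rw [PySem.List.pyRange_one_cons hlt]
      simp
  | case3 j h =>
      rw [pvAInner_here_end cs j h]
      have hr : PySem.List.pyRange (j : Int) (j : Int) 1 = [] := by simp [pysem]
      rw [hr]; simp

-- main invariant: B's fold over the suffix from i computes A's outer loop from i
theorem pvMain (cs : List Char) (n : Nat) :
    ∀ (i : Nat) (acc : List (Int × Int)) (w next : Int), cs.length ≤ i + n →
      (let r := (PySem.List.enumerate (cs.drop i) (i : Int)).foldl pvBStep (acc, false, w, next)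
       (r.1, r.2.2.2)) = pvAOuter cs i acc next := by
  induction n with
  | zero =>
      intro i acc w next hn
      have hd : cs.drop i = [] := List.drop_eq_nil_of_le (by omega)
      rw [pvAOuter_end cs i acc next (by omega)]
      simp [hd]
  | succ m ih =>
      intro i acc w next hn
      by_cases h : i < cs.length
      · conv_lhs => rw [List.drop_eq_getElem_cons h]
        rw [PySem.List.enumerate_cons, List.foldl_cons]
        by_cases hs : PySem.Chars.isspace cs[i] = true
        · have hstep : pvBStep (acc, false, w, next) ((i : Int), cs[i])
              = (acc, false, w, next) := by simp [pvBStep, hs]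
          have hcast : ((i : Int) + 1) = ((i + 1 : Nat) : Int) := by push_cast; ring
          rw [hstep, hcast, ih (i + 1) acc w next (by omega),
            pvAOuter_space cs i acc next h hs]
        · have hs' : PySem.Chars.isspace cs[i] = false := by simpa using hs
          have hstep : pvBStep (acc, false, w, next) ((i : Int), cs[i])
              = (acc ++ [((i : Int), next)], true, next, next + 1) := by
            simp [pvBStep, hs']
          have hcast : ((i : Int) + 1) = ((i + 1 : Nat) : Int) := by push_cast; ring
          rw [hstep, hcast, pvRun cs (i + 1)]
          have hji : pvAInner cs i = pvAInner cs (i + 1) := pvAInner_skip cs i h hs'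
          rw [← hji]
          have hgt : i < pvAInner cs i := pvAInner_gt cs i h hs'
          have hle : pvAInner cs i ≤ cs.length := hji ▸ pvAInner_le cs (i + 1) (by omega)
          have hacc : acc ++ [((i : Int), next)]
                ++ (PySem.List.pyRange ((i + 1 : Nat) : Int) ((pvAInner cs i : Nat) : Int) 1).map
                  (fun k => (k, next))
              = acc ++ (PySem.List.pyRange (i : Int) ((pvAInner cs i : Nat) : Int) 1).map
                  (fun k => (k, next)) := by
            have hlt : (i : Int) < ((pvAInner cs i : Nat) : Int) := by exact_mod_cast hgt
            rw [PySem.List.pyRange_one_cons hlt]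
            push_cast
            simp
          rw [hacc, pvAOuter_word cs i acc next h hs']
          by_cases hjl : pvAInner cs i < cs.length
          · have hsp : PySem.Chars.isspace (cs[pvAInner cs i]'hjl) = true := by
              have := pvAInner_stop cs (i + 1) (hji ▸ hjl)
              simpa [← hji] using this
            conv_lhs => rw [List.drop_eq_getElem_cons hjl]
            rw [PySem.List.enumerate_cons, List.foldl_cons]
            have hstep2 : pvBStep
                (acc ++ (PySem.List.pyRange (i : Int) ((pvAInner cs i : Nat) : Int) 1).map
                  (fun k => (k, next)), true, next, next + 1)
                ((pvAInner cs i : Int), cs[pvAInner cs i])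
                = (acc ++ (PySem.List.pyRange (i : Int) ((pvAInner cs i : Nat) : Int) 1).map
                  (fun k => (k, next)), false, next, next + 1) := by
              simp only [pvBStep]; rw [if_pos hsp]
            have hcast2 : ((pvAInner cs i : Int) + 1) = ((pvAInner cs i + 1 : Nat) : Int) := by
              push_cast; ring
            rw [hstep2, hcast2, ih (pvAInner cs i + 1) _ next (next + 1) (by omega),
              pvAOuter_space cs (pvAInner cs i) _ (next + 1) hjl hsp]
          · have hd : cs.drop (pvAInner cs i) = [] := List.drop_eq_nil_of_le (by omega)
            rw [hd, PySem.List.enumerate_nil, List.foldl_nil,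
              pvAOuter_end cs (pvAInner cs i) _ (next + 1) hjl]
      · have hd : cs.drop i = [] := List.drop_eq_nil_of_le (by omega)
        rw [pvAOuter_end cs i acc next h]
        simp [hd]

-- ===== VERDICT (by name: the statement is the Claim_ definition above) =====
theorem tokenize_words_flat_py_spec : Claim_equal_tokenize_words_flat_py := by
  intro text _
  show tokenize_words_flat_py text = tokenize_words_flat_py_alt text
  unfold tokenize_words_flat_py tokenize_words_flat_py_alt
  have := pvMain text.toList text.toList.length 0 [] 0 0 (by omega)
  simpa using this.symm
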